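-- pv_equiv track=rewrite | github.com/aligirayhanozbay/fr3D | postprocessing/sampling_pts.py | _vertex_renumbering_filter_nodemap
-- ===== SOURCE A (Python) =====
-- def _vertex_renumbering_filter_nodemap(x):
--     out = {}
--     min_encountered = {}
--     for ele_type, npts in x:
--         if (ele_type not in out) or (min_encountered[ele_type] > npts):
--             out[ele_type] = x[(ele_type, npts)]
--             min_encountered[ele_type] = npts
--
--     return out
-- ===== SOURCE B (Python) =====
-- def _vertex_renumbering_filter_nodemap(x):
--     # First pass: group the npts values of each element type; second pass:
--     # emit, per element type, the value stored under its minimal npts key.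
--     groups = {}
--     for ele_type, npts in x:
--         groups.setdefault(ele_type, []).append(npts)
--     return {ele_type: x[(ele_type, min(npts_list))]
--             for ele_type, npts_list in groups.items()}
-- ===== Notes on version B (the rewrite author's own statement) =====
-- stated objective: alternative
-- what changed: Replaces A's single streaming scan that conditionally overwrites out/min_encountered on each strictly-smaller npts with a group-then-reduce shape: one pass builds a dict mapping each ele_type to the list of its npts values, then a dict comprehension emits x[(ele_type, min(npts_list))] per group. Pre_ only excludes association lists with duplicate (ele_type, npts) keys, which do not represent any Python dict input.
import Mathlib
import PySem

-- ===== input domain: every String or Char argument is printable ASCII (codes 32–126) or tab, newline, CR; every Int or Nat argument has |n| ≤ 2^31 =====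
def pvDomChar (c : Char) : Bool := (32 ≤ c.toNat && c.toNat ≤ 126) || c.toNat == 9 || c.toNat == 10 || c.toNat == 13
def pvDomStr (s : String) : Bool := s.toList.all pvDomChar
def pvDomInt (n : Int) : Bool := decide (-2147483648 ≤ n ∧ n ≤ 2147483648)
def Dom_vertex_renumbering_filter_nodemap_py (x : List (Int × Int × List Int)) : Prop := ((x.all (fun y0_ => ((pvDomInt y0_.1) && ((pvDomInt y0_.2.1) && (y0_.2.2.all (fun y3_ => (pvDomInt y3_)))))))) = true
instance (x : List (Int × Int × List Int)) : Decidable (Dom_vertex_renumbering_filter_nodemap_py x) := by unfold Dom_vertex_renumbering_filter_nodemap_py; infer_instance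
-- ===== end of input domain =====

-- B regroups A's streaming min-scan into group-by-type then reduce-by-min (alternative decomposition, same cost).
-- x is a Python dict keyed by (ele_type, npts); here it is the association list in insertion order.

-- Python dict lookup x[(t, n)]: the (unique, under Pre_) entry with key (t, n).
-- Both Pythons only look this up for a key that occurs in x, so the `none` (KeyError) branch is unreachable.
def pyDictGetD (x : List (Int × Int × List Int)) (t n : Int) : List Int :=
  match x.find? (fun p => p.1 == t && p.2.1 == n) with
  | some p => p.2.2
  | none => []

-- ===== PORT A =====
-- One loop step of A. `min_encountered[ele_type]` is only read when `ele_type in out`, and then the key is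
-- present (the two dicts always hold the same keys), so `getD … 0` is exact.
def aStep (x : List (Int × Int × List Int))
    (s : PySem.Dict Int (List Int) × PySem.Dict Int Int) (p : Int × Int × List Int) :
    PySem.Dict Int (List Int) × PySem.Dict Int Int :=
  if !s.1.contains p.1 || decide (s.2.getD p.1 0 > p.2.1) then
    (s.1.insert p.1 (pyDictGetD x p.1 p.2.1), s.2.insert p.1 p.2.1)
  else s

def vertex_renumbering_filter_nodemap_py (x : List (Int × Int × List Int)) : List (Int × List Int) :=
  (x.foldl (aStep x) (PySem.Dict.empty, PySem.Dict.empty)).1.items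

-- ===== PORT B =====
-- port of min(ns) (Python's builtin); only applied to the nonempty group lists, so getD 0 is never taken
def pyMin (ns : List Int) : Int := (PySem.List.min? ns (fun y => y)).getD 0

-- groups.setdefault(ele_type, []).append(npts)  ==  groups[t] = groups.get(t, []) + [npts]
def bGroups (x : List (Int × Int × List Int)) : PySem.Dict Int (List Int) :=
  x.foldl (fun g p => g.insert p.1 (g.getD p.1 [] ++ [p.2.1])) PySem.Dict.empty

def vertex_renumbering_filter_nodemap_py_alt (x : List (Int × Int × List Int)) : List (Int × List Int) :=
  (bGroups x).items.map (fun q => (q.1, pyDictGetD x q.1 (pyMin q.2)))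

-- ===== PRECONDITION & SPEC =====
-- Pre_ excludes association lists with duplicate (ele_type, npts) keys: they do not represent any Python
-- dict input (a dict has unique keys), so neither Python ever runs on them.
def Pre_vertex_renumbering_filter_nodemap_py (x : List (Int × Int × List Int)) : Prop :=
  (x.map (fun p => (p.1, p.2.1))).Nodup
instance (x : List (Int × Int × List Int)) : Decidable (Pre_vertex_renumbering_filter_nodemap_py x) := by unfold Pre_vertex_renumbering_filter_nodemap_py; infer_instance

def pvWitness_vertex_renumbering_filter_nodemap_py : (List (Int × Int × List Int)) :=
  [(1, 2, [7]), (1, 1, [8]), (2, 5, [])]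

def Spec_vertex_renumbering_filter_nodemap_py (x : List (Int × Int × List Int)) (out : List (Int × List Int)) : Prop := out = vertex_renumbering_filter_nodemap_py_alt x
instance (x : List (Int × Int × List Int)) (out : List (Int × List Int)) : Decidable (Spec_vertex_renumbering_filter_nodemap_py x out) := by unfold Spec_vertex_renumbering_filter_nodemap_py; infer_instance

-- ===== CLAIM (what is proved, stated in full; the proofs are below) =====
def Claim_equal_vertex_renumbering_filter_nodemap_py : Prop := ∀ (x : List (Int × Int × List Int)), Dom_vertex_renumbering_filter_nodemap_py x → Pre_vertex_renumbering_filter_nodemap_py x → Spec_vertex_renumbering_filter_nodemap_py x (vertex_renumbering_filter_nodemap_py x)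

-- ===== LEMMAS AND PROOFS =====

lemma pyMin_singleton (n : Int) : pyMin [n] = n := by
  simp [pyMin, PySem.List.min?_id_cons]

lemma pyMin_append (a : Int) (tl : List Int) (n : Int) :
    pyMin ((a :: tl) ++ [n]) = min (pyMin (a :: tl)) n := by
  simp [pyMin, PySem.List.min?_id_cons, List.foldl_append]

-- the main loop invariant: A's two streaming dicts are the image of B's grouping dict
lemma loop_eq (x : List (Int × Int × List Int)) (l : List (Int × Int × List Int)) :
    ∀ (out : PySem.Dict Int (List Int)) (me : PySem.Dict Int Int) (g : PySem.Dict Int (List Int)),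
    g.keys.Nodup →
    (∀ q ∈ g.items, q.2 ≠ []) →
    me.items = g.items.map (fun q => (q.1, pyMin q.2)) →
    out.items = g.items.map (fun q => (q.1, pyDictGetD x q.1 (pyMin q.2))) →
    (l.foldl (aStep x) (out, me)).1.items
      = (l.foldl (fun g p => g.insert p.1 (g.getD p.1 [] ++ [p.2.1])) g).items.map
          (fun q => (q.1, pyDictGetD x q.1 (pyMin q.2))) := by
  induction l with
  | nil => intro out me g _ _ _ hout; simpa using hout
  | cons p l ih =>
    intro out me g hnd hne hme hout
    obtain ⟨t, n, v⟩ := p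
    have hkeys_me : me.keys = g.keys := by
      simp only [PySem.Dict.keys, hme, List.map_map]; rfl
    have hkeys_out : out.keys = g.keys := by
      simp only [PySem.Dict.keys, hout, List.map_map]; rfl
    have hnd_me : me.keys.Nodup := hkeys_me ▸ hnd
    have hc_out : out.contains t = g.contains t := by
      rw [PySem.Dict.contains_eq_decide_mem_keys, PySem.Dict.contains_eq_decide_mem_keys, hkeys_out]
    by_cases hc : g.contains t = true
    · -- t already grouped
      have hsome : (g.get? t).isSome := by
        rw [← PySem.Dict.contains_eq_isSome_get? g t]; exact hc
      obtain ⟨ns, hns⟩ := Option.isSome_iff_exists.mp hsome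
      have hgetDg : g.getD t [] = ns := PySem.Dict.getD_of_get?_eq_some g [] hns
      have hmemg : (t, ns) ∈ g.items := PySem.Dict.mem_items_of_get?_eq_some g hns
      have hcme : me.contains t = true := by
        rw [PySem.Dict.contains_eq_decide_mem_keys, hkeys_me,
            ← PySem.Dict.contains_eq_decide_mem_keys]; exact hc
      have hcout : out.contains t = true := by rw [hc_out]; exact hc
      have hnsne : ns ≠ [] := hne _ hmemg
      obtain ⟨a, tl, rfl⟩ : ∃ a tl, ns = a :: tl := by
        cases ns with | nil => exact absurd rfl hnsne | cons a tl => exact ⟨a, tl, rfl⟩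
      have hmemme : (t, pyMin (a :: tl)) ∈ me.items := by
        rw [hme]; exact List.mem_map_of_mem hmemg
      have hgetDme : me.getD t 0 = pyMin (a :: tl) :=
        PySem.Dict.getD_of_mem_items me hmemme hnd_me 0
      -- the value at any item of g with key t is (a :: tl)
      have hval : ∀ q ∈ g.items, q.1 = t → q.2 = a :: tl := by
        intro q hq hq1
        have h1 : g.get? q.1 = some q.2 := PySem.Dict.get?_of_mem_items g hq hnd
        rw [hq1, hns] at h1
        exact (Option.some_inj.mp h1).symm
      by_cases hlt : pyMin (a :: tl) > n
      · -- strictly smaller: A overwrites, new min is n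
        have hcond : (!out.contains t || decide (me.getD t 0 > n)) = true := by
          simp [hgetDme, hlt]
        have hminnew : pyMin (a :: (tl ++ [n])) = n := by
          rw [← List.cons_append, pyMin_append]; exact min_eq_right (le_of_lt hlt)
        simp only [List.foldl_cons, aStep, hcond, if_true, hgetDg]
        apply ih
        · rw [PySem.Dict.keys_insert_of_contains g _ hc]; exact hnd
        · intro q hq
          rcases (PySem.Dict.mem_items_insert _ _ _ q).mp hq with h | ⟨h, _⟩
          · rw [h]; simp
          · exact hne _ h
        · rw [PySem.Dict.items_insert_of_contains me _ hcme,
              PySem.Dict.items_insert_of_contains g _ hc, hme, List.map_map, List.map_map]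
          apply List.map_congr_left
          intro q hq
          by_cases hq1 : q.1 = t
          · simp [hq1]
            rw [hminnew]
          · simp [hq1]
        · rw [PySem.Dict.items_insert_of_contains out _ hcout,
              PySem.Dict.items_insert_of_contains g _ hc, hout, List.map_map, List.map_map]
          apply List.map_congr_left
          intro q hq
          by_cases hq1 : q.1 = t
          · have := hval q hq hq1
            simp [hq1, this]
            rw [hminnew]
          · simp [hq1]
      · -- not smaller: A skips, min unchanged
        have hcond : (!out.contains t || decide (me.getD t 0 > n)) = false := by
          simp [hc_out, hc, hgetDme, hlt]
        have hminnew : pyMin (a :: (tl ++ [n])) = pyMin (a :: tl) := by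
          rw [← List.cons_append, pyMin_append]; exact min_eq_left (le_of_not_gt hlt)
        simp only [List.foldl_cons, aStep, hcond, if_false, Bool.false_eq_true, hgetDg]
        apply ih
        · rw [PySem.Dict.keys_insert_of_contains g _ hc]; exact hnd
        · intro q hq
          rcases (PySem.Dict.mem_items_insert _ _ _ q).mp hq with h | ⟨h, _⟩
          · rw [h]; simp
          · exact hne _ h
        · rw [PySem.Dict.items_insert_of_contains g _ hc, hme, List.map_map]
          apply List.map_congr_left
          intro q hq
          by_cases hq1 : q.1 = t
          · have := hval q hq hq1
            simp [hq1, this]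
            rw [hminnew]
          · simp [hq1]
        · rw [PySem.Dict.items_insert_of_contains g _ hc, hout, List.map_map]
          apply List.map_congr_left
          intro q hq
          by_cases hq1 : q.1 = t
          · have := hval q hq hq1
            simp [hq1, this]
            rw [hminnew]
          · simp [hq1]
    · -- fresh element type: all three dicts append
      have hc' : g.contains t = false := by simpa using hc
      have hcond : (!out.contains t || decide (me.getD t 0 > n)) = true := by
        simp [hc_out, hc']
      have hgetDg : g.getD t [] = [] := PySem.Dict.getD_of_not_contains g [] hc'
      have hcme : me.contains t = false := by
        rw [PySem.Dict.contains_eq_decide_mem_keys, hkeys_me,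
            ← PySem.Dict.contains_eq_decide_mem_keys]; exact hc'
      have hcout : out.contains t = false := by rw [hc_out]; exact hc'
      simp only [List.foldl_cons, aStep, hcond, if_true, hgetDg]
      apply ih
      · rw [PySem.Dict.keys_insert_of_not_contains g _ hc']
        refine List.Nodup.append hnd (List.nodup_singleton t) ?_
        intro b hb hb'
        simp only [List.mem_singleton] at hb'
        subst hb'
        rw [← PySem.Dict.contains_iff_mem_keys] at hb
        rw [hc'] at hb; exact Bool.false_ne_true hb
      · intro q hq
        rcases (PySem.Dict.mem_items_insert _ _ _ q).mp hq with h | ⟨h, _⟩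
        · rw [h]; simp
        · exact hne _ h
      · rw [PySem.Dict.items_insert_of_not_contains me _ hcme,
            PySem.Dict.items_insert_of_not_contains g _ hc', hme, List.map_append]
        simp [pyMin_singleton]
      · rw [PySem.Dict.items_insert_of_not_contains out _ hcout,
            PySem.Dict.items_insert_of_not_contains g _ hc', hout, List.map_append]
        simp [pyMin_singleton]

-- ===== VERDICT (by name: the statement is the Claim_ definition above) =====
theorem vertex_renumbering_filter_nodemap_py_spec : Claim_equal_vertex_renumbering_filter_nodemap_py := by
  intro x _ _
  unfold Spec_vertex_renumbering_filter_nodemap_py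
  unfold vertex_renumbering_filter_nodemap_py vertex_renumbering_filter_nodemap_py_alt bGroups
  exact loop_eq x x PySem.Dict.empty PySem.Dict.empty PySem.Dict.empty
    (by simp [PySem.Dict.empty, PySem.Dict.keys]) (by simp [PySem.Dict.empty])
    (by simp [PySem.Dict.empty]) (by simp [PySem.Dict.empty])
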